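-- pv_equiv track=rewrite | github.com/Wictor-dev/ifpi-ads-algoritmos2020 | lista_fabio_4/fabio_q_17.py | encontrar_menor_soma
-- ===== SOURCE A (Python) =====
-- def encontrar_menor_soma(n,vetor):
--     menor = somar_valores(vetor[0])
--     indice = 1
--     for i in range(1,n):
--         valor = somar_valores(vetor[i])
--         if valor < menor:
--             menor = valor
--             indice = i + 1
--
--     return indice
--
-- def somar_valores(vetor):
--     count = 0
--     for i in vetor:
--         count += i
--
--     return count
-- ===== SOURCE B (Python) =====
-- def encontrar_menor_soma(n, vetor):
--     somas = [sum(vetor[0])]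
--     for i in range(1, n):
--         somas.append(sum(vetor[i]))
--     m = min(somas)
--     return somas.index(m) + 1
-- ===== Notes on version B (the rewrite author's own statement) =====
-- stated objective: alternative
-- what changed: B materializes the list of row sums first (using built-in sum), then finds the minimum value and looks up its first index in two separate passes, instead of A's single-pass running-minimum with hand-rolled summation.
import Mathlib
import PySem

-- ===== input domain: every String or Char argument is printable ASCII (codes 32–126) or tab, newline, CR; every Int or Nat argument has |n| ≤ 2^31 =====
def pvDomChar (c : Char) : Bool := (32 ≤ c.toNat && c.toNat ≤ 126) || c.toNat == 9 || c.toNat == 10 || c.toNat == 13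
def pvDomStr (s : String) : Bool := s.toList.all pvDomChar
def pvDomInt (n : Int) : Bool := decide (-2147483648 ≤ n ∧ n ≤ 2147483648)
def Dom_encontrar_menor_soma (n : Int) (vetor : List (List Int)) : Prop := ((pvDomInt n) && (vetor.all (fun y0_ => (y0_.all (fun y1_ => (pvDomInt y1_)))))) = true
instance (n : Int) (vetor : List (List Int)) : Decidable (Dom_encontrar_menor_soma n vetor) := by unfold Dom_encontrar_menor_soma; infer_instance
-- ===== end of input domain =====

-- B materializes the list of row sums (built-in sum), then takes the minimum and its first
-- index in two separate passes, instead of A's single-pass running minimum (alternative decomposition).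


-- ===== PORT A =====
def somar_valores (vetor : List Int) : Int :=
  vetor.foldl (fun count i => count + i) 0

def encontrar_menor_soma (n : Int) (vetor : List (List Int)) : Int :=
  let menor := somar_valores ((PySem.List.pyGet? vetor 0).getD [])
  let st := (PySem.List.pyRange 1 n 1).foldl
    (fun (st : Int × Int) i =>
      let valor := somar_valores ((PySem.List.pyGet? vetor i).getD [])
      if valor < st.1 then (valor, i + 1) else st)
    (menor, 1)
  st.2

-- ===== PORT B =====
def encontrar_menor_soma_alt (n : Int) (vetor : List (List Int)) : Int :=
  let somas := (PySem.List.pyRange 1 n 1).foldl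
    (fun acc i => acc ++ [((PySem.List.pyGet? vetor i).getD []).sum])
    [((PySem.List.pyGet? vetor 0).getD []).sum]
  let m := (PySem.List.min? somas (fun x => x)).getD 0
  (((PySem.List.index? somas m).getD 0 : Nat) : Int) + 1

-- ===== PRECONDITION & SPEC =====
-- Pre_ excludes exactly the inputs where Python A raises IndexError: an empty vetor
-- (vetor[0]) or n exceeding len(vetor) (vetor[i] inside the loop).
def Pre_encontrar_menor_soma (n : Int) (vetor : List (List Int)) : Prop :=
  vetor ≠ [] ∧ n ≤ vetor.length
instance (n : Int) (vetor : List (List Int)) : Decidable (Pre_encontrar_menor_soma n vetor) := by unfold Pre_encontrar_menor_soma; infer_instance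

def pvWitness_encontrar_menor_soma : Int × List (List Int) := (3, [[2, 5], [1], [4, -3]])

def Spec_encontrar_menor_soma (n : Int) (vetor : List (List Int)) (out : Int) : Prop := out = encontrar_menor_soma_alt n vetor
instance (n : Int) (vetor : List (List Int)) (out : Int) : Decidable (Spec_encontrar_menor_soma n vetor out) := by unfold Spec_encontrar_menor_soma; infer_instance

-- ===== CLAIM (what is proved, stated in full; the proofs are below) =====
def Claim_equal_encontrar_menor_soma : Prop := ∀ (n : Int) (vetor : List (List Int)), Dom_encontrar_menor_soma n vetor → Pre_encontrar_menor_soma n vetor → Spec_encontrar_menor_soma n vetor (encontrar_menor_soma n vetor)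

-- ===== LEMMAS AND PROOFS =====

-- A's hand-rolled accumulation is List.sum.
theorem somar_valores_eq_sum (v : List Int) : somar_valores v = v.sum := by
  simpa using PySem.List.foldl_add (l := v) (g := fun x => x) (a := 0)

-- Core invariant: A's running-minimum fold over indices 1..n-1 computes the minimum of the
-- sum list together with (first index of that minimum) + 1.
theorem loop_inv (f : Int → Int) (s0 : Int) :
    ∀ n : Int, 1 ≤ n →
      (PySem.List.pyRange 1 n 1).foldl
        (fun (st : Int × Int) i => if f i < st.1 then (f i, i + 1) else st) (s0, 1)
      = (((PySem.List.pyRange 1 n 1).map f).foldl min s0,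
         (((PySem.List.index? (s0 :: (PySem.List.pyRange 1 n 1).map f)
             (((PySem.List.pyRange 1 n 1).map f).foldl min s0)).getD 0 : Nat) : Int) + 1) := by
  intro n hn
  induction n, hn using Int.le_induction with
  | base =>
      rw [PySem.List.pyRange_one_eq_nil (le_refl 1)]
      simp
  | succ n hn ih =>
      rw [PySem.List.pyRange_one_succ_right (by omega : (1:Int) ≤ n)]
      set L : List Int := (PySem.List.pyRange 1 n 1).map f with hL
      set m : Int := L.foldl min s0 with hm
      have hmin? : PySem.List.min? (s0 :: L) (fun y => y) = some m := by
        rw [PySem.List.min?_id_cons, hm]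
      have hisMin : ∀ y ∈ (s0 :: L), m ≤ y := by
        intro y hy
        simpa using PySem.List.min?_isMin hmin? y hy
      have hlen : ((s0 :: L).length : Int) = n := by
        simp [hL, PySem.List.length_pyRange_one]
        omega
      rw [List.foldl_append, List.map_append, List.foldl_append, ih]
      simp only [List.foldl_cons, List.foldl_nil, List.map_cons, List.map_nil]
      by_cases h : f n < m
      · rw [if_pos h]
        have hne : f n ∉ (s0 :: L) := fun hmem => absurd (hisMin _ hmem) (not_le.mpr h)
        have hidx : PySem.List.index? ((s0 :: L) ++ [f n]) (f n) = some ((s0 :: L).length) :=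
          PySem.List.index?_append_singleton_self _ _ hne
        rw [min_eq_right (le_of_lt h)]
        simp only [← hL]
        rw [← List.cons_append, hidx]
        simp only [Option.getD_some, List.length_cons] at hlen ⊢
        rw [Prod.mk.injEq]
        exact ⟨rfl, by omega⟩
      · rw [if_neg h]
        have hmem : m ∈ (s0 :: L) := PySem.List.min?_mem hmin?
        rw [min_eq_left (not_lt.mp h)]
        rw [← List.cons_append]
        rw [PySem.List.index?_append_of_mem _ hmem]

-- ===== VERDICT (by name: the statement is the Claim_ definition above) =====
theorem encontrar_menor_soma_spec : Claim_equal_encontrar_menor_soma := by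
  intro n vetor _ _
  unfold Spec_encontrar_menor_soma encontrar_menor_soma encontrar_menor_soma_alt
  simp only [PySem.List.foldl_append_singleton_eq_map, List.singleton_append,
    somar_valores_eq_sum]
  by_cases hn : 1 ≤ n
  · rw [loop_inv _ _ n hn, PySem.List.min?_id_cons]
    simp
  · rw [PySem.List.pyRange_one_eq_nil (by omega : n ≤ 1)]
    simp [PySem.List.min?_id_cons]
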